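-- pv_equiv track=rewrite | github.com/zilp/metre-beatre | src/analyzeMeter.py | trocheeEstimate
-- ===== SOURCE A (Python) =====
-- def trocheeEstimate(syllable, place, value):
--     ''' Match stress syllable against trochaic pattern (10101010...)
--         and return a value based on how well they match'''
--     result = 0
--     for l in syllable:
--         if place == 0 and l == "1":
--             place = 1
--             result += value
--         elif place == 1 and l == "0":
--             place = 0
--             result += value
--     return result
-- ===== SOURCE B (Python) =====
-- def trocheeEstimate(syllable, place, value):
--     ''' Match stress syllable against trochaic pattern (10101010...)
--         and return a value based on how well they match'''
--     if place not in (0, 1):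
--         return 0
--     bits = [c for c in syllable if c in "01"]
--     if not bits:
--         return 0
--     expected = "1" if place == 0 else "0"
--     changes = sum(1 for a, b in zip(bits, bits[1:]) if a != b)
--     count = changes + 1 if bits[0] == expected else changes
--     return count * value
-- ===== Notes on version B (the rewrite author's own statement) =====
-- stated objective: alternative
-- what changed: Replaces A's stateful scan that toggles 'place' per matched char by a closed computation: filter the string to '0'/'1' characters, count adjacent changes (length of the run-length-collapsed bit string minus one), add one if the first bit equals the expected bit, and multiply that count by value once instead of accumulating by repeated addition.
import Mathlib
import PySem

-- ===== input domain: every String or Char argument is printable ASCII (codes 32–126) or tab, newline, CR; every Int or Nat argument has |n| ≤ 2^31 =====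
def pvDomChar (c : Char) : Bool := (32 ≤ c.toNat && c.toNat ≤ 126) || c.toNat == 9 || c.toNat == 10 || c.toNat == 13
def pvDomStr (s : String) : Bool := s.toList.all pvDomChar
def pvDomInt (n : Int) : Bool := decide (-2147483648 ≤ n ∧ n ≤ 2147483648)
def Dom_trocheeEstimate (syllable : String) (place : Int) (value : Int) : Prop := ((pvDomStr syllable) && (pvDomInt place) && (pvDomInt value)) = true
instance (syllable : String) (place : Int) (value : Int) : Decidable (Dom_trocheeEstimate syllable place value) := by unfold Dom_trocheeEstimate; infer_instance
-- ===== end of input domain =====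

-- B replaces A's stateful place-toggling scan by a closed computation: filter to '0'/'1',
-- count adjacent changes (length of the run-length-collapsed string), fix up by the first
-- bit vs the expected bit, and multiply by value once (objective: alternative decomposition).

-- ===== PORT A =====
def trocheeEstimate (syllable : String) (place : Int) (value : Int) : Int :=
  (syllable.toList.foldl (fun (st : Int × Int) l =>
      if st.1 = 0 ∧ l = '1' then (1, st.2 + value)
      else if st.1 = 1 ∧ l = '0' then (0, st.2 + value)
      else st) (place, 0)).2

-- ===== PORT B =====
def trocheeEstimate_alt (syllable : String) (place : Int) (value : Int) : Int :=
  if place ≠ 0 ∧ place ≠ 1 then 0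
  else
    let bits := syllable.toList.filter (fun c => c = '0' ∨ c = '1')
    match bits with
    | [] => 0
    | b :: rest =>
      let expected : Char := if place = 0 then '1' else '0'
      let changes : Int := (((b :: rest).zip rest).countP (fun p => p.1 != p.2) : Nat)
      let count : Int := if b = expected then changes + 1 else changes
      count * value

-- ===== PRECONDITION & SPEC =====
def Spec_trocheeEstimate (syllable : String) (place : Int) (value : Int) (out : Int) : Prop := out = trocheeEstimate_alt syllable place value
instance (syllable : String) (place : Int) (value : Int) (out : Int) : Decidable (Spec_trocheeEstimate syllable place value out) := by unfold Spec_trocheeEstimate; infer_instance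

-- ===== CLAIM (what is proved, stated in full; the proofs are below) =====
def Claim_equal_trocheeEstimate : Prop := ∀ (syllable : String) (place : Int) (value : Int), Dom_trocheeEstimate syllable place value → Spec_trocheeEstimate syllable place value (trocheeEstimate syllable place value)

-- ===== LEMMAS AND PROOFS =====

-- flip of an expected bit
def pvFlip (e : Char) : Char := if e = '1' then '0' else '1'

-- count of matches in A's scan, expressed as alternating-subsequence count
def pvCnt (e : Char) : List Char → Nat
  | [] => 0
  | c :: l => if c = e then 1 + pvCnt (pvFlip e) l else pvCnt e l

-- number of adjacent unequal pairs
def pvAdj : List Char → Nat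
  | [] => 0
  | [_] => 0
  | a :: b :: l => (if a = b then 0 else 1) + pvAdj (b :: l)

theorem pvAdj_eq_countP (b : Char) (rest : List Char) :
    (((b :: rest).zip rest).countP (fun p => p.1 != p.2)) = pvAdj (b :: rest) := by
  induction rest generalizing b with
  | nil => rfl
  | cons c l ih =>
    simp only [List.zip_cons_cons, List.countP_cons, ih, pvAdj]
    by_cases h : b = c <;> simp [h] <;> omega

-- A's fold is dead when place ∉ {0,1}
theorem pvFold_dead (value : Int) (l : List Char) (p r : Int) (h0 : p ≠ 0) (h1 : p ≠ 1) :
    (l.foldl (fun (st : Int × Int) c =>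
      if st.1 = 0 ∧ c = '1' then (1, st.2 + value)
      else if st.1 = 1 ∧ c = '0' then (0, st.2 + value)
      else st) (p, r)) = (p, r) := by
  induction l with
  | nil => rfl
  | cons c l ih =>
    simp only [List.foldl_cons]
    rw [if_neg (by simp [h0]), if_neg (by simp [h1])]
    exact ih

def pvE (place : Int) : Char := if place = 0 then '1' else '0'

-- A's fold, for place ∈ {0,1}, accumulates value once per pvCnt match
theorem pvFold_cnt (value : Int) (l : List Char) (p r : Int) (h : p = 0 ∨ p = 1) :
    (l.foldl (fun (st : Int × Int) c =>
      if st.1 = 0 ∧ c = '1' then (1, st.2 + value)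
      else if st.1 = 1 ∧ c = '0' then (0, st.2 + value)
      else st) (p, r)).2 = r + value * pvCnt (pvE p) l := by
  induction l generalizing p r with
  | nil => simp [pvCnt]
  | cons c l ih =>
    rcases h with h | h <;> subst h <;>
      simp only [List.foldl_cons, pvCnt, pvE, pvFlip] <;>
      by_cases hc : c = '1' <;> by_cases hc0 : c = '0' <;>
      simp_all [ih _ _ (Or.inl rfl), ih _ _ (Or.inr rfl), pvE] <;> ring

-- filtering out non-bits does not change pvCnt when e is a bit
theorem pvCnt_filter (e : Char) (l : List Char) (he : e = '0' ∨ e = '1') :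
    pvCnt e l = pvCnt e (l.filter (fun c => decide (c = '0' ∨ c = '1'))) := by
  induction l generalizing e with
  | nil => rfl
  | cons c l ih =>
    have hfe : pvFlip e = '0' ∨ pvFlip e = '1' := by
      rcases he with h | h <;> simp [pvFlip, h]
    by_cases hb : c = '0' ∨ c = '1'
    · have hfil : (c :: l).filter (fun c => decide (c = '0' ∨ c = '1'))
          = c :: l.filter (fun c => decide (c = '0' ∨ c = '1')) := by
        rcases hb with rfl | rfl <;> simp [List.filter_cons]
      rw [hfil]
      by_cases hc : c = e
      · simp [pvCnt, hc, ih _ hfe]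
      · simp [pvCnt, hc, ih _ he]
    · have hfil : (c :: l).filter (fun c => decide (c = '0' ∨ c = '1'))
          = l.filter (fun c => decide (c = '0' ∨ c = '1')) := by
        simp [List.filter_cons, hb]
      have hc : c ≠ e := by rcases he with h | h <;> subst h <;> simp_all
      rw [hfil]
      simp [pvCnt, hc, ih _ he]

-- first-element contribution used by B's closed form
def pvFirst (e : Char) : List Char → Nat
  | [] => 0
  | b :: _ => if b = e then 1 else 0

-- on all-bit lists, pvCnt has the closed form used by B
theorem pvCnt_closed (e : Char) (l : List Char) (he : e = '0' ∨ e = '1')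
    (hl : ∀ c ∈ l, c = '0' ∨ c = '1') :
    pvCnt e l = pvFirst e l + pvAdj l := by
  induction l generalizing e with
  | nil => rfl
  | cons b l ih =>
    have hb := hl b (by simp)
    have hl' : ∀ c ∈ l, c = '0' ∨ c = '1' := fun c hc => hl c (by simp [hc])
    match l with
    | [] =>
      by_cases hbe : b = e <;> simp [pvCnt, pvFirst, pvAdj, hbe]
    | c :: l' =>
      have hc := hl' c (by simp)
      have i0 := ih '0' (Or.inl rfl) hl'
      have i1 := ih '1' (Or.inr rfl) hl'
      rcases he with rfl | rfl <;> rcases hb with rfl | rfl <;> rcases hc with h | h <;>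
        rw [h] at i0 i1 ⊢ <;>
        simp [pvCnt, pvFlip, pvFirst, pvAdj, i0, i1] at * <;> omega

-- ===== VERDICT (by name: the statement is the Claim_ definition above) =====
theorem trocheeEstimate_spec : Claim_equal_trocheeEstimate := by
  intro syllable place value _
  unfold Spec_trocheeEstimate trocheeEstimate trocheeEstimate_alt
  by_cases hp : place ≠ 0 ∧ place ≠ 1
  · rw [if_pos hp, pvFold_dead value _ place 0 hp.1 hp.2]
  · rw [if_neg hp]
    push_neg at hp
    have hor : place = 0 ∨ place = 1 := by
      by_cases h : place = 0
      · exact Or.inl h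
      · exact Or.inr (hp h)
    rw [pvFold_cnt value _ place 0 hor]
    have he : pvE place = '0' ∨ pvE place = '1' := by
      rcases hor with h | h <;> simp [pvE, h]
    rw [pvCnt_filter _ _ he]
    have hbits : ∀ c ∈ (syllable.toList.filter (fun c => decide (c = '0' ∨ c = '1'))),
        c = '0' ∨ c = '1' := by
      intro c hc
      simpa using List.of_mem_filter hc
    rw [pvCnt_closed _ _ he hbits]
    rcases hm : syllable.toList.filter (fun c => decide (c = '0' ∨ c = '1')) with _ | ⟨b, rest⟩
    · simp [pvFirst, pvAdj]
    · have hA := pvAdj_eq_countP b rest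
      have hExp : pvE place = (if place = 0 then '1' else '0') := rfl
      by_cases hbe : b = (if place = 0 then '1' else '0')
      · rw [hbe] at hA
        simp [pvFirst, hExp, hbe, hA] <;> push_cast <;> ring
      · simp [pvFirst, hExp, hbe, hA] <;> push_cast <;> ring
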